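-- pv_equiv track=rewrite | github.com/rossturner/cruzorder | parsing/TitleSorter.py | get_highest_title_keys
-- ===== SOURCE A (Python) =====
-- def get_highest_title_keys(titles):
--     for prefix in ['e', 'k', 'd', 'c', 'b']:
--         keys_with_prefix = []
--         for title in titles:
--             if title[0] == prefix:
--                 keys_with_prefix.append(title)
--
--         if len(keys_with_prefix) > 0:
--             return keys_with_prefix
--
--     return []
-- ===== SOURCE B (Python) =====
-- def get_highest_title_keys(titles):
--     groups = {}
--     for title in titles:
--         groups.setdefault(title[0], []).append(title)
--     for prefix in ['e', 'k', 'd', 'c', 'b']: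
--         if prefix in groups:
--             return groups[prefix]
--     return []
-- ===== Notes on version B (the rewrite author's own statement) =====
-- stated objective: idiomatic
-- what changed: Replaces the prefix-outer/titles-inner nested rescans with a single grouping pass (dict from first char to its titles in order) followed by a constant-size priority lookup.
import Mathlib
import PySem

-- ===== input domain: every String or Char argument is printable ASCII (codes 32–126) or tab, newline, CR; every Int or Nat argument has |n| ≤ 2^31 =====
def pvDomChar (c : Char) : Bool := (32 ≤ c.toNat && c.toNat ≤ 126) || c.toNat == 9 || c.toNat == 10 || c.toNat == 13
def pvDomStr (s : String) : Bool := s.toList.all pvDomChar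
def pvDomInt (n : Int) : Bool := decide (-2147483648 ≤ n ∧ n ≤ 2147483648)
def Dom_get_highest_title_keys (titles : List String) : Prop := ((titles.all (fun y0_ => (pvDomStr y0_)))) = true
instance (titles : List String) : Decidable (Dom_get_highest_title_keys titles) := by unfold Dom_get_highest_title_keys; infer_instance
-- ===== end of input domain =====

-- B replaces A's prefix-outer/titles-inner rescans with one grouping pass over titles
-- (dict: first char -> its titles in order) and a constant-size priority lookup (objective: idiomatic).


-- ===== PORT A =====
-- inner loop: keys_with_prefix = [title for ...append...]; title[0] via pyGet? (none = IndexError, excluded by Pre_)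
def pvKeysWithPrefix (titles : List String) (pfx : Char) : List String :=
  titles.foldl (fun acc t => if PySem.Str.pyGet? t 0 == some pfx then acc ++ [t] else acc) []

-- outer loop over the priority prefixes, early return on a non-empty batch
def pvLoopA (prefixes : List Char) (titles : List String) : List String :=
  match prefixes with
  | [] => []
  | p :: ps =>
    let keys_with_prefix := pvKeysWithPrefix titles p
    if keys_with_prefix.length > 0 then keys_with_prefix else pvLoopA ps titles

def get_highest_title_keys (titles : List String) : List String :=
  pvLoopA ['e', 'k', 'd', 'c', 'b'] titles

-- ===== PORT B =====
-- grouping pass: groups.setdefault(title[0], []).append(title); title[0] via pyGet? (none = IndexError, excluded by Pre_)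
def pvGroup (titles : List String) : PySem.Dict Char (List String) :=
  titles.foldl
    (fun d t =>
      match PySem.Str.pyGet? t 0 with
      | some c => d.insert c (d.getD c [] ++ [t])
      | none => d)
    PySem.Dict.empty

-- priority lookup: 'if prefix in groups: return groups[prefix]'
def pvLookupB (prefixes : List Char) (g : PySem.Dict Char (List String)) : List String :=
  match prefixes with
  | [] => []
  | p :: ps =>
    match g.get? p with
    | some v => v
    | none => pvLookupB ps g

def get_highest_title_keys_alt (titles : List String) : List String :=
  pvLookupB ['e', 'k', 'd', 'c', 'b'] (pvGroup titles)

-- ===== PRECONDITION & SPEC =====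
-- Pre_ excludes lists containing an empty string: there title[0] raises IndexError in both A and B.
def Pre_get_highest_title_keys (titles : List String) : Prop :=
  ∀ t ∈ titles, t ≠ ""
instance (titles : List String) : Decidable (Pre_get_highest_title_keys titles) := by unfold Pre_get_highest_title_keys; infer_instance

def pvWitness_get_highest_title_keys : List String := ["kite", "apple", "dog", "egg"]

def Spec_get_highest_title_keys (titles : List String) (out : List String) : Prop := out = get_highest_title_keys_alt titles
instance (titles : List String) (out : List String) : Decidable (Spec_get_highest_title_keys titles out) := by unfold Spec_get_highest_title_keys; infer_instance

-- ===== CLAIM (what is proved, stated in full; the proofs are below) =====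
def Claim_equal_get_highest_title_keys : Prop := ∀ (titles : List String), Dom_get_highest_title_keys titles → Pre_get_highest_title_keys titles → Spec_get_highest_title_keys titles (get_highest_title_keys titles)

-- ===== LEMMAS AND PROOFS =====

-- the titles with first char c, in input order
def pvFilterC (titles : List String) (c : Char) : List String :=
  titles.filter (fun t => PySem.Str.pyGet? t 0 == some c)

theorem pvKeysWithPrefix_eq_filter (titles : List String) (c : Char) :
    pvKeysWithPrefix titles c = pvFilterC titles c := by
  simpa [pvKeysWithPrefix, pvFilterC] using
    PySem.List.foldl_append_if_eq_filter (l := titles)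
      (p := fun t => PySem.Str.pyGet? t 0 == some c) (acc := [])

-- grouping invariant: the dict's entry at c is the accumulated entry extended by the filter
theorem pvGroup_invariant (titles : List String) :
    ∀ (d : PySem.Dict Char (List String)) (c : Char),
      (titles.foldl
        (fun d t =>
          match PySem.Str.pyGet? t 0 with
          | some ch => d.insert ch (d.getD ch [] ++ [t])
          | none => d) d).get? c =
      match d.get? c with
      | some v => some (v ++ pvFilterC titles c)
      | none => if pvFilterC titles c = [] then none else some (pvFilterC titles c) := by
  induction titles with
  | nil =>
    intro d c
    cases h : d.get? c <;> simp [pvFilterC, h]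
  | cons t ts ih =>
    intro d c
    cases hg : PySem.Str.pyGet? t 0 with
    | none =>
      have hg' : PySem.List.pyGet? t.toList 0 = none := by simpa using hg
      simp only [List.foldl_cons, hg]
      rw [ih d c]
      cases h : d.get? c <;> simp [pvFilterC, hg']
    | some ch =>
      have hg' : PySem.List.pyGet? t.toList 0 = some ch := by simpa using hg
      by_cases hc : ch = c
      · subst hc
        simp only [List.foldl_cons, hg]
        rw [ih (d.insert ch (d.getD ch [] ++ [t])) ch]
        rw [PySem.Dict.get?_insert_self]
        cases h : d.get? ch with
        | some v =>
          have hD : d.getD ch [] = v := by simp [PySem.Dict.getD, h]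
          simp [pvFilterC, hg', hD]
        | none =>
          have hD : d.getD ch [] = [] := by simp [PySem.Dict.getD, h]
          simp [pvFilterC, hg', hD]
      · simp only [List.foldl_cons, hg]
        rw [ih (d.insert ch (d.getD ch [] ++ [t])) c]
        rw [PySem.Dict.get?_insert_of_ne _ _ (fun h => hc h.symm)]
        cases h : d.get? c <;> simp [pvFilterC, hg', hc]

theorem pvGroup_get? (titles : List String) (c : Char) :
    (pvGroup titles).get? c =
      if pvFilterC titles c = [] then none else some (pvFilterC titles c) := by
  have h := pvGroup_invariant titles PySem.Dict.empty c
  simpa [pvGroup, PySem.Dict.empty, PySem.Dict.get?] using h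

theorem pvLoop_eq (prefixes : List Char) (titles : List String) :
    pvLoopA prefixes titles = pvLookupB prefixes (pvGroup titles) := by
  induction prefixes with
  | nil => rfl
  | cons p ps ih =>
    simp only [pvLoopA, pvLookupB, pvKeysWithPrefix_eq_filter, pvGroup_get?]
    by_cases h : pvFilterC titles p = []
    · simp [h, ih]
    · have : (pvFilterC titles p).length > 0 := by
        cases hf : pvFilterC titles p with
        | nil => exact absurd hf h
        | cons a l => simp
      simp [h, this]

-- ===== VERDICT (by name: the statement is the Claim_ definition above) =====
theorem get_highest_title_keys_spec : Claim_equal_get_highest_title_keys := by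
  intro titles _ _
  unfold Spec_get_highest_title_keys get_highest_title_keys get_highest_title_keys_alt
  exact pvLoop_eq _ _
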